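-- pv_equiv track=rewrite | github.com/simha-pruthu/discovery-engine | comparison.py | normalize_theme_names
-- ===== SOURCE A (Python) =====
-- def normalize_theme_names(theme_names):
--
--     canonical_map = {}
--
--     for name in theme_names:
--         lower = name.lower()
--
--         if any(word in lower for word in ["bug", "crash", "glitch", "instability"]):
--             canonical_map[name] = "Stability & Reliability"
--
--         elif any(word in lower for word in ["performance", "slow", "lag"]):
--             canonical_map[name] = "Performance"
--
--         elif any(word in lower for word in ["ui", "usability", "design"]):
--             canonical_map[name] = "UX & Usability"
--
--         elif any(word in lower for word in ["sync", "sharing", "collaboration"]):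
--             canonical_map[name] = "Sync & Collaboration"
--
--         elif any(word in lower for word in ["pricing", "paywall", "monetization"]):
--             canonical_map[name] = "Monetization & Pricing"
--
--         elif any(word in lower for word in ["feature", "lack", "removal"]):
--             canonical_map[name] = "Feature Gaps"
--
--         elif any(word in lower for word in ["ai"]):
--             canonical_map[name] = "AI & Automation"
--
--         elif any(word in lower for word in ["compatibility", "android", "localization", "language"]):
--             canonical_map[name] = "Platform & Compatibility"
--
--         else:
--             canonical_map[name] = "Other"
--
--     return canonical_map
-- ===== SOURCE B (Python) =====
-- RULES = [
--     (["bug", "crash", "glitch", "instability"], "Stability & Reliability"),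
--     (["performance", "slow", "lag"], "Performance"),
--     (["ui", "usability", "design"], "UX & Usability"),
--     (["sync", "sharing", "collaboration"], "Sync & Collaboration"),
--     (["pricing", "paywall", "monetization"], "Monetization & Pricing"),
--     (["feature", "lack", "removal"], "Feature Gaps"),
--     (["ai"], "AI & Automation"),
--     (["compatibility", "android", "localization", "language"], "Platform & Compatibility"),
-- ]
--
--
-- def normalize_theme_names(theme_names):
--     # staged overwrite passes: start everything at "Other", then apply the rules
--     # from lowest to highest priority, overwriting matches, so the highest-priority
--     # (earliest) matching rule wins by writing last
--     canonical_map = {name: "Other" for name in theme_names}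
--     for keywords, category in reversed(RULES):
--         for name in theme_names:
--             lower = name.lower()
--             if any(k in lower for k in keywords):
--                 canonical_map[name] = category
--     return canonical_map
-- ===== Notes on version B (the rewrite author's own statement) =====
-- stated objective: alternative
-- what changed: Instead of a single pass assigning each name the first matching branch of the if/elif chain, B makes staged overwrite passes: it initialises every name to 'Other', then sweeps the keyword rules from lowest to highest priority, overwriting matching names, so the highest-priority match wins by writing last.
import Mathlib
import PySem

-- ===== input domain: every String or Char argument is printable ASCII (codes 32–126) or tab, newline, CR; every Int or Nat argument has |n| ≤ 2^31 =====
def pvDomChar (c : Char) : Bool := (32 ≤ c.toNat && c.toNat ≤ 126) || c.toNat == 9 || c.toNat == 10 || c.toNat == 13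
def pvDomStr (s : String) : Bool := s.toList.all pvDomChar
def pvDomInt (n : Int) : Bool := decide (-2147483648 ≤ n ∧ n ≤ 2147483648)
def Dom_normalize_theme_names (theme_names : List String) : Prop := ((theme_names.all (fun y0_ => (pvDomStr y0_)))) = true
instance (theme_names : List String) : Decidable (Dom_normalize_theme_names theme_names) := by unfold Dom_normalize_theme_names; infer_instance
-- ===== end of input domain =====

-- B replaces A's single-pass first-match if/elif chain by staged overwrite passes
-- (init everything to "Other", then sweep the rules lowest-to-highest priority,
-- overwriting matches, so the highest-priority match writes last): alternative
-- algorithm, same cost.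

-- ===== PORT A =====
def normalize_theme_names (theme_names : List String) : List (String × String) :=
  (theme_names.foldl (fun canonical_map name =>
      let lower := PySem.Str.lower name
      if ["bug", "crash", "glitch", "instability"].any (fun word => PySem.Str.isIn word lower) then
        canonical_map.insert name "Stability & Reliability"
      else if ["performance", "slow", "lag"].any (fun word => PySem.Str.isIn word lower) then
        canonical_map.insert name "Performance"
      else if ["ui", "usability", "design"].any (fun word => PySem.Str.isIn word lower) then
        canonical_map.insert name "UX & Usability"
      else if ["sync", "sharing", "collaboration"].any (fun word => PySem.Str.isIn word lower) then
        canonical_map.insert name "Sync & Collaboration"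
      else if ["pricing", "paywall", "monetization"].any (fun word => PySem.Str.isIn word lower) then
        canonical_map.insert name "Monetization & Pricing"
      else if ["feature", "lack", "removal"].any (fun word => PySem.Str.isIn word lower) then
        canonical_map.insert name "Feature Gaps"
      else if ["ai"].any (fun word => PySem.Str.isIn word lower) then
        canonical_map.insert name "AI & Automation"
      else if ["compatibility", "android", "localization", "language"].any (fun word => PySem.Str.isIn word lower) then
        canonical_map.insert name "Platform & Compatibility"
      else
        canonical_map.insert name "Other") (PySem.Dict.empty : PySem.Dict String String)).items

-- ===== PORT B =====
def pvRules : List (List String × String) :=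
  [(["bug", "crash", "glitch", "instability"], "Stability & Reliability"),
   (["performance", "slow", "lag"], "Performance"),
   (["ui", "usability", "design"], "UX & Usability"),
   (["sync", "sharing", "collaboration"], "Sync & Collaboration"),
   (["pricing", "paywall", "monetization"], "Monetization & Pricing"),
   (["feature", "lack", "removal"], "Feature Gaps"),
   (["ai"], "AI & Automation"),
   (["compatibility", "android", "localization", "language"], "Platform & Compatibility")]

def normalize_theme_names_alt (theme_names : List String) : List (String × String) :=
  -- canonical_map = {name: "Other" for name in theme_names}
  let init := theme_names.foldl (fun d name => d.insert name "Other")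
      (PySem.Dict.empty : PySem.Dict String String)
  -- for keywords, category in reversed(RULES): for name in theme_names: overwrite on match
  (pvRules.reverse.foldl (fun d r =>
      theme_names.foldl (fun d name =>
        let lower := PySem.Str.lower name
        if r.1.any (fun k => PySem.Str.isIn k lower) then d.insert name r.2 else d) d)
    init).items

-- ===== PRECONDITION & SPEC =====
def Spec_normalize_theme_names (theme_names : List String) (out : List (String × String)) : Prop := out = normalize_theme_names_alt theme_names
instance (theme_names : List String) (out : List (String × String)) : Decidable (Spec_normalize_theme_names theme_names out) := by unfold Spec_normalize_theme_names; infer_instance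

-- ===== CLAIM (what is proved, stated in full; the proofs are below) =====
def Claim_equal_normalize_theme_names : Prop := ∀ (theme_names : List String), Dom_normalize_theme_names theme_names → Spec_normalize_theme_names theme_names (normalize_theme_names theme_names)

-- ===== LEMMAS AND PROOFS =====

-- A's per-name value: the if/elif chain
def pvChain (name : String) : String :=
  let lower := PySem.Str.lower name
  if ["bug", "crash", "glitch", "instability"].any (fun word => PySem.Str.isIn word lower) then "Stability & Reliability"
  else if ["performance", "slow", "lag"].any (fun word => PySem.Str.isIn word lower) then "Performance"
  else if ["ui", "usability", "design"].any (fun word => PySem.Str.isIn word lower) then "UX & Usability"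
  else if ["sync", "sharing", "collaboration"].any (fun word => PySem.Str.isIn word lower) then "Sync & Collaboration"
  else if ["pricing", "paywall", "monetization"].any (fun word => PySem.Str.isIn word lower) then "Monetization & Pricing"
  else if ["feature", "lack", "removal"].any (fun word => PySem.Str.isIn word lower) then "Feature Gaps"
  else if ["ai"].any (fun word => PySem.Str.isIn word lower) then "AI & Automation"
  else if ["compatibility", "android", "localization", "language"].any (fun word => PySem.Str.isIn word lower) then "Platform & Compatibility"
  else "Other"

-- match test of one rule against one name
def pvMatch (r : List String × String) (name : String) : Bool :=
  r.1.any (fun k => PySem.Str.isIn k (PySem.Str.lower name))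

-- lookup after a fold inserting f n at every n of names
lemma get?_insertFold (names : List String) (f : String → String)
    (d : PySem.Dict String String) (k : String) :
    (names.foldl (fun d n => d.insert n (f n)) d).get? k
      = if k ∈ names then some (f k) else d.get? k := by
  induction names generalizing d with
  | nil => simp
  | cons n t ih =>
      simp only [List.foldl_cons, ih, PySem.Dict.get?_insert, List.mem_cons]
      by_cases h1 : k ∈ t <;> by_cases h2 : k = n <;> simp [h1, h2]

-- one overwrite pass: lookup
lemma get?_pass (names : List String) (p : String → Bool) (c : String)
    (d : PySem.Dict String String) (k : String) :
    (names.foldl (fun d n => if p n then d.insert n c else d) d).get? k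
      = if k ∈ names ∧ p k then some c else d.get? k := by
  induction names generalizing d with
  | nil => simp
  | cons n t ih =>
      simp only [List.foldl_cons, ih, List.mem_cons]
      by_cases h2 : k = n
      · subst h2
        by_cases h3 : p k <;> by_cases h1 : k ∈ t <;>
          simp [h1, h3]
      · rw [apply_ite (fun d => PySem.Dict.get? d k),
          PySem.Dict.get?_insert_of_ne d c h2, ite_self]
        by_cases h1 : k ∈ t <;> by_cases h3 : p k <;> simp [h1, h2, h3]

-- one overwrite pass over names already present keeps the key list
lemma keys_pass (names : List String) (p : String → Bool) (c : String)
    (d : PySem.Dict String String) (h : ∀ n ∈ names, n ∈ d.keys) :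
    (names.foldl (fun d n => if p n then d.insert n c else d) d).keys = d.keys := by
  induction names generalizing d with
  | nil => rfl
  | cons n t ih =>
      simp only [List.foldl_cons]
      by_cases hp : p n
      · have hc : d.contains n = true := by
          rw [PySem.Dict.contains_iff_mem_keys]; exact h n (List.mem_cons_self ..)
        have hk := PySem.Dict.keys_insert_of_contains d c hc
        rw [if_pos hp, ih _ (fun m hm => by rw [hk]; exact h m (List.mem_cons_of_mem _ hm)), hk]
      · rw [if_neg hp, ih _ (fun m hm => h m (List.mem_cons_of_mem _ hm))]

-- the staged passes: lookup at a name of the list threads through each rule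
lemma get?_passes (rs : List (List String × String)) (names : List String)
    (d : PySem.Dict String String) (k : String) (hk : k ∈ names) :
    (rs.foldl (fun d r =>
        names.foldl (fun d name =>
          let lower := PySem.Str.lower name
          if r.1.any (fun x => PySem.Str.isIn x lower) then d.insert name r.2 else d) d) d).get? k
      = rs.foldl (fun o r => if pvMatch r k then some r.2 else o) (d.get? k) := by
  induction rs generalizing d with
  | nil => rfl
  | cons r rest ih =>
      simp only [List.foldl_cons, ih]
      rw [get?_pass names (fun n => r.1.any (fun x => PySem.Str.isIn x (PySem.Str.lower n)))]
      simp [pvMatch, hk]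

-- the staged passes keep the key list
lemma keys_passes (rs : List (List String × String)) (names : List String)
    (d : PySem.Dict String String) (h : ∀ n ∈ names, n ∈ d.keys) :
    (rs.foldl (fun d r =>
        names.foldl (fun d name =>
          let lower := PySem.Str.lower name
          if r.1.any (fun x => PySem.Str.isIn x lower) then d.insert name r.2 else d) d) d).keys
      = d.keys := by
  induction rs generalizing d with
  | nil => rfl
  | cons r rest ih =>
      simp only [List.foldl_cons]
      have hk := keys_pass names (fun n => r.1.any (fun x => PySem.Str.isIn x (PySem.Str.lower n))) r.2 d h
      rw [ih _ (fun m hm => by rw [hk]; exact h m hm), hk]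

-- last-write-wins over the reversed rules = first match of the chain
lemma revFold_eq_chain (k : String) :
    pvRules.reverse.foldl (fun o r => if pvMatch r k then some r.2 else o) (some "Other")
      = some (pvChain k) := by
  simp only [pvRules, pvMatch, pvChain, List.reverse, List.reverseAux, List.foldl_cons,
    List.foldl_nil]
  split_ifs <;> rfl

-- A's fold is the insert-the-chain-value fold
lemma a_fold_eq (theme_names : List String) :
    normalize_theme_names theme_names
      = (theme_names.foldl (fun d n => d.insert n (pvChain n))
          (PySem.Dict.empty : PySem.Dict String String)).items := by
  unfold normalize_theme_names
  congr 1
  apply PySem.List.foldl_congr_mem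
  intro d n _
  simp only [pvChain]
  split_ifs <;> rfl

-- ===== VERDICT (by name: the statement is the Claim_ definition above) =====
theorem normalize_theme_names_spec : Claim_equal_normalize_theme_names := by
  intro theme_names _
  unfold Spec_normalize_theme_names normalize_theme_names_alt
  rw [a_fold_eq]
  simp only []
  set dA := theme_names.foldl (fun d n => d.insert n (pvChain n))
      (PySem.Dict.empty : PySem.Dict String String) with hdA
  set init := theme_names.foldl (fun d n => d.insert n "Other")
      (PySem.Dict.empty : PySem.Dict String String) with hinit
  set dB := pvRules.reverse.foldl (fun d r =>
      theme_names.foldl (fun d name =>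
        let lower := PySem.Str.lower name
        if r.1.any (fun k => PySem.Str.isIn k lower) then d.insert name r.2 else d) d) init with hdB
  -- membership in the initial dict's keys
  have hmem : ∀ n ∈ theme_names, n ∈ init.keys := by
    intro n hn
    have : init.get? n = some "Other" := by rw [hinit, get?_insertFold, if_pos hn]
    rw [← PySem.Dict.contains_iff_mem_keys, PySem.Dict.contains_eq_isSome_get?, this]; rfl
  have hkeysA : dA.keys = PySem.Set.update ([] : List String) theme_names := by
    rw [hdA, PySem.Dict.keys_foldl_insert, PySem.Dict.keys_empty]
  have hkeysI : init.keys = PySem.Set.update ([] : List String) theme_names := by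
    rw [hinit, PySem.Dict.keys_foldl_insert, PySem.Dict.keys_empty]
  have hkeysB : dB.keys = dA.keys := by
    rw [hdB, keys_passes _ _ _ hmem, hkeysI, hkeysA]
  have hndA : dA.keys.Nodup := by
    rw [hdA]; exact PySem.Dict.nodup_keys_foldl_insert _ _ _ PySem.Dict.nodup_keys_empty
  have hndB : dB.keys.Nodup := by rw [hkeysB]; exact hndA
  -- a key of dA is a member of theme_names
  have hkeymem : ∀ k ∈ dA.keys, k ∈ theme_names := by
    intro k hk
    by_contra hkn
    have h1 : dA.get? k = none := by rw [hdA, get?_insertFold, if_neg hkn, PySem.Dict.get?_empty]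
    exact ((PySem.Dict.get?_eq_none_iff_not_mem_keys dA k).mp h1) hk
  rw [PySem.Dict.items_eq_map_keys dB hndB "Other", PySem.Dict.items_eq_map_keys dA hndA "Other",
    hkeysB]
  apply List.map_congr_left
  intro k hk
  have hkt : k ∈ theme_names := hkeymem k hk
  have hA : dA.get? k = some (pvChain k) := by rw [hdA, get?_insertFold, if_pos hkt]
  have hB : dB.get? k = some (pvChain k) := by
    rw [hdB, get?_passes _ _ _ _ hkt, hinit, get?_insertFold, if_pos hkt, revFold_eq_chain]
  simp [PySem.Dict.getD_eq_get?_getD, hA, hB]
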